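-- pv_equiv track=rewrite | github.com/OrianaVR/Tarea_2_lenguajes_formales | main.py | formatear_gramatica
-- ===== SOURCE A (Python) =====
-- def formatear_gramatica(producciones, orden_original_nts):
--     """
--     Formatea la gramática resultante, respetando el orden de los NTs originales.
--     """
--
--     # 1. Separar NTs originales de los nuevos
--     originales = [nt for nt in orden_original_nts if nt in producciones]
--
--     # CORRECCIÓN DEFINITIVA: Se usa 'orden_original_nts' en lugar del nombre incorrecto.
--     nuevos = sorted([nt for nt in producciones.keys() if nt not in orden_original_nts])
--
--     # 2. Orden de salida: Originales (en orden de aparición) + Nuevos (ordenados)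
--     orden_salida = originales + nuevos
--
--     salida = []
--     for nt in orden_salida:
--         if nt in producciones:
--             prods = producciones[nt]
--             if prods:
--                 alternativas_ordenadas = sorted(prods)
--                 salida.append(f"{nt}-> {' '.join(alternativas_ordenadas)}")
--     return "\n".join(salida)
-- ===== SOURCE B (Python) =====
-- def formatear_gramatica(producciones, orden_original_nts):
--     # Schedule-key approach: tag every candidate occurrence with a sortable key
--     # ((position, "") for originals, (len(orden), name) for new NTs) and emit in
--     # one pass over the single key-sorted candidate list.
--     n = len(orden_original_nts)
--     vistos = set(orden_original_nts)
--     cands = [(i, "", nt) for i, nt in enumerate(orden_original_nts) if nt in producciones]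
--     cands += [(n, nt, nt) for nt in producciones if nt not in vistos]
--     salida = []
--     for _, _, nt in sorted(cands, key=lambda t: (t[0], t[1])):
--         prods = producciones[nt]
--         if prods:
--             salida.append(f"{nt}-> {' '.join(sorted(prods))}")
--     return "\n".join(salida)
-- ===== Notes on version B (the rewrite author's own statement) =====
-- stated objective: alternative
-- what changed: B replaces A's two staged lists (filtered originals + sorted new NTs), their concatenation and a loop that re-checks membership, by a schedule-key design: every candidate occurrence is tagged once with a sortable key ((position, "") for originals, (len(orden), name) for new NTs), the single candidate list is sorted once by that key, and one pass over it emits the lines. A's per-key linear scan 'nt not in orden_original_nts' becomes one set lookup.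
import Mathlib
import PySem

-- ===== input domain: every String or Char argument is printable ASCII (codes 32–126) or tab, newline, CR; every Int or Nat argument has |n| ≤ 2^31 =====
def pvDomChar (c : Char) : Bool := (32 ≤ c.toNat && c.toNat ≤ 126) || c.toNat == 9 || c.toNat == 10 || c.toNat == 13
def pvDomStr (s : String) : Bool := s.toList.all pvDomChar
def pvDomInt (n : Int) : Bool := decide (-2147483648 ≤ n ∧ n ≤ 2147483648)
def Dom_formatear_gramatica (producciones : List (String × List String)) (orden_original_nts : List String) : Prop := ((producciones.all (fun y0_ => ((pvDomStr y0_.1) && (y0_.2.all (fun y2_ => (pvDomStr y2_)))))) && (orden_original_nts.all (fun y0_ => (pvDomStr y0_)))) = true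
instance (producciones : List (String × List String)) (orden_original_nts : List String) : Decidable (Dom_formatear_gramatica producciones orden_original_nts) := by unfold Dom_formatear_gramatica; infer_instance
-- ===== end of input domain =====

-- B replaces A's two staged lists plus re-checking loop by one key-sorted candidate list
-- ((position,"") for original occurrences, (len(orden),name) for new NTs) emitted in a single pass (alternative decomposition).

-- ===== PORT A =====
def formatear_gramatica (producciones : List (String × List String)) (orden_original_nts : List String) : String :=
  let d := PySem.Dict.mk producciones
  let originales := orden_original_nts.filter (fun nt => d.contains nt)
  let nuevos := PySem.List.sorted (d.keys.filter (fun nt => !(orden_original_nts.contains nt))) (fun x => x) false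
  let orden_salida := originales ++ nuevos
  let salida := orden_salida.foldl (fun acc nt =>
    if d.contains nt then
      let prods := d.getD nt []
      if !prods.isEmpty then
        acc ++ [nt ++ "-> " ++ PySem.Str.join " " (PySem.List.sorted prods (fun x => x) false)]
      else acc
    else acc) []
  PySem.Str.join "\n" salida

-- ===== PORT B =====
-- the key tuple (t[0], t[1]) of Python's sorted compares lexicographically: ported as toLex into Lex (Int × String)
def formatear_gramatica_alt (producciones : List (String × List String)) (orden_original_nts : List String) : String :=
  let d := PySem.Dict.mk producciones
  let n : Int := orden_original_nts.length
  let vistos := PySem.Set.ofList orden_original_nts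
  let cands : List (Int × String × String) :=
    ((PySem.List.enumerate orden_original_nts).filter (fun p => d.contains p.2)).map
        (fun p => (p.1, "", p.2))
      ++ (d.keys.filter (fun nt => !(PySem.Set.contains vistos nt))).map (fun nt => (n, nt, nt))
  let salida := (PySem.List.sorted cands (fun t => toLex (t.1, t.2.1)) false).foldl
    (fun acc t =>
      let nt := t.2.2
      let prods := d.getD nt []
      if !prods.isEmpty then
        acc ++ [nt ++ "-> " ++ PySem.Str.join " " (PySem.List.sorted prods (fun x => x) false)]
      else acc) []
  PySem.Str.join "\n" salida

-- ===== PRECONDITION & SPEC =====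
-- Pre_ excludes association lists with a duplicated key: such a list represents no Python
-- dict (dict keys are unique), so A's first-match behaviour on it is nothing a dict ever shows.
def Pre_formatear_gramatica (producciones : List (String × List String)) (orden_original_nts : List String) : Prop :=
  (producciones.map Prod.fst).Nodup
instance (producciones : List (String × List String)) (orden_original_nts : List String) : Decidable (Pre_formatear_gramatica producciones orden_original_nts) := by unfold Pre_formatear_gramatica; infer_instance

def pvWitness_formatear_gramatica : (List (String × List String)) × List String :=
  ([("S", ["a B", "b"]), ("B", ["b"])], ["S", "B"])

def Spec_formatear_gramatica (producciones : List (String × List String)) (orden_original_nts : List String) (out : String) : Prop := out = formatear_gramatica_alt producciones orden_original_nts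
instance (producciones : List (String × List String)) (orden_original_nts : List String) (out : String) : Decidable (Spec_formatear_gramatica producciones orden_original_nts out) := by unfold Spec_formatear_gramatica; infer_instance

-- ===== CLAIM (what is proved, stated in full; the proofs are below) =====
def Claim_equal_formatear_gramatica : Prop := ∀ (producciones : List (String × List String)) (orden_original_nts : List String), Dom_formatear_gramatica producciones orden_original_nts → Pre_formatear_gramatica producciones orden_original_nts → Spec_formatear_gramatica producciones orden_original_nts (formatear_gramatica producciones orden_original_nts)

-- ===== LEMMAS AND PROOFS =====

-- the formatted line for one nonterminal
def pvFmtLine (d : PySem.Dict String (List String)) (nt : String) : String :=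
  nt ++ "-> " ++ PySem.Str.join " " (PySem.List.sorted (d.getD nt []) (fun x => x) false)

-- the indices of enumerate are strictly increasing
lemma pvEnum_pairwise (xs : List String) :
    (PySem.List.enumerate xs 0).Pairwise (fun a b => a.1 < b.1) := by
  have h := PySem.List.pairwise_lt_pyRange_one 0 (0 + (xs.length : Int))
  rw [← PySem.List.map_fst_enumerate xs 0] at h
  exact List.pairwise_map.mp h

-- B's sorted candidate list is exactly "original occurrences in order, then new NTs by name"
lemma pvSorted_cands (d : PySem.Dict String (List String)) (orden : List String)
    (newKeys : List String) (hnd : newKeys.Nodup) :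
    PySem.List.sorted
      (((PySem.List.enumerate orden).filter (fun p => d.contains p.2)).map
          (fun p => (p.1, "", p.2))
        ++ newKeys.map (fun nt => ((orden.length : Int), nt, nt)))
      (fun t : Int × String × String => toLex (t.1, t.2.1)) false
    = ((PySem.List.enumerate orden).filter (fun p => d.contains p.2)).map
          (fun p => (p.1, "", p.2))
      ++ (PySem.List.sorted newKeys (fun x => x) false).map (fun nt => ((orden.length : Int), nt, nt)) := by
  apply PySem.List.sorted_eq_of_perm_of_pairwise_lt
  · exact List.Perm.append_left _ ((PySem.List.sorted_perm newKeys (fun x => x) false).map _)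
  · rw [List.pairwise_append]
    refine ⟨?_, ?_, ?_⟩
    · apply List.pairwise_map.mpr
      refine ((pvEnum_pairwise orden).filter _).imp ?_
      intro a b h
      exact Prod.Lex.toLex_lt_toLex.mpr (Or.inl h)
    · apply List.pairwise_map.mpr
      have hle : (PySem.List.sorted newKeys (fun x => x) false).Pairwise (fun a b => a ≤ b) :=
        PySem.List.sorted_pairwise newKeys (fun x => x)
      have hnd' : (PySem.List.sorted newKeys (fun x => x) false).Nodup :=
        ((PySem.List.sorted_perm newKeys (fun x => x) false).nodup_iff).mpr hnd
      have hlt : (PySem.List.sorted newKeys (fun x => x) false).Pairwise (fun a b => a < b) :=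
        (hle.and hnd').imp (fun h => lt_of_le_of_ne h.1 h.2)
      refine hlt.imp ?_
      intro a b h
      exact Prod.Lex.toLex_lt_toLex.mpr (Or.inr ⟨rfl, h⟩)
    · intro a ha b hb
      rcases List.mem_map.mp ha with ⟨p, hp, rfl⟩
      rcases List.mem_map.mp hb with ⟨nt, hnt, rfl⟩
      have hpmem : p ∈ PySem.List.enumerate orden 0 := (List.mem_filter.mp hp).1
      have : p.1 ∈ (PySem.List.enumerate orden 0).map (·.1) := List.mem_map.mpr ⟨p, hpmem, rfl⟩
      rw [PySem.List.map_fst_enumerate] at this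
      have hlt : p.1 < (orden.length : Int) := by
        have := (PySem.List.mem_pyRange_one.mp this).2
        omega
      exact Prod.Lex.toLex_lt_toLex.mpr (Or.inl hlt)

-- the two programs agree on duplicate-free dicts
lemma formatear_gramatica_eq_alt (producciones : List (String × List String)) (orden : List String)
    (hpre : (producciones.map Prod.fst).Nodup) :
    formatear_gramatica producciones orden = formatear_gramatica_alt producciones orden := by
  unfold formatear_gramatica formatear_gramatica_alt
  simp only []
  set d := PySem.Dict.mk producciones with hd
  set Q : String → Bool := fun nt => !(d.getD nt []).isEmpty with hQ
  -- normalise B's set-membership filter to a list-membership filter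
  have hset : ∀ k, PySem.Set.contains (PySem.Set.ofList orden) k = orden.contains k := by
    intro k
    by_cases hm : k ∈ orden <;>
      simp [PySem.Set.contains_eq_listContains, PySem.Set.mem_ofList, hm]
  rw [List.filter_congr (l := d.keys) (p := fun nt => !((PySem.Set.ofList orden).contains nt))
    (q := fun nt => !(orden.contains nt)) (by intro a _; simp only [hset])]
  set newKeys := d.keys.filter (fun nt => !(orden.contains nt)) with hnew
  have hndK : newKeys.Nodup := by
    rw [hnew]
    exact List.Nodup.filter _ (by exact hpre)
  -- characterise B's sort
  rw [pvSorted_cands d orden newKeys hndK]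
  -- both loops are append-if folds
  have hfunA : (fun (acc : List String) nt =>
      if d.contains nt then
        let prods := d.getD nt []
        if !prods.isEmpty then
          acc ++ [nt ++ "-> " ++ PySem.Str.join " " (PySem.List.sorted prods (fun x => x) false)]
        else acc
      else acc)
      = fun acc nt => if (d.contains nt && Q nt) then acc ++ [pvFmtLine d nt] else acc := by
    funext acc nt
    by_cases h1 : d.contains nt <;> by_cases h2 : (d.getD nt []).isEmpty <;>
      simp [hQ, pvFmtLine, h1, h2]
  have hfunB : (fun (acc : List String) (t : Int × String × String) =>
      let nt := t.2.2
      let prods := d.getD nt []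
      if !prods.isEmpty then
        acc ++ [nt ++ "-> " ++ PySem.Str.join " " (PySem.List.sorted prods (fun x => x) false)]
      else acc)
      = fun acc t => if Q t.2.2 then acc ++ [pvFmtLine d t.2.2] else acc := by
    funext acc t
    simp [hQ, pvFmtLine]
  rw [hfunA, hfunB, PySem.List.foldl_append_if, PySem.List.foldl_append_if, List.nil_append,
    List.nil_append]
  congr 1
  -- B's filtered map factors through the third component
  have hBproj : (((PySem.List.enumerate orden).filter (fun p => d.contains p.2)).map
          (fun p => ((p.1 : Int), "", p.2))
        ++ (PySem.List.sorted newKeys (fun x => x) false).map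
            (fun nt => ((orden.length : Int), nt, nt))).map (fun t : Int × String × String => t.2.2)
      = orden.filter (fun nt => d.contains nt) ++ PySem.List.sorted newKeys (fun x => x) false := by
    rw [List.map_append, List.map_map, List.map_map]
    congr 1
    · have : ((fun t : Int × String × String => t.2.2) ∘ fun p : Int × String => ((p.1 : Int), "", p.2))
          = fun p : Int × String => p.2 := rfl
      rw [this]
      have hfm := List.filter_map (l := PySem.List.enumerate orden 0)
        (f := fun p : Int × String => p.2) (p := fun nt => d.contains nt)
      simp only [Function.comp_def] at hfm
      rw [PySem.List.map_snd_enumerate] at hfm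
      exact hfm.symm
    · have : ((fun t : Int × String × String => t.2.2) ∘ fun nt : String => ((orden.length : Int), nt, nt))
          = id := rfl
      rw [this, List.map_id]
  calc ((orden.filter (fun nt => d.contains nt) ++ PySem.List.sorted newKeys (fun x => x) false).filter
          (fun nt => d.contains nt && Q nt)).map (pvFmtLine d)
      = ((orden.filter (fun nt => d.contains nt) ++ PySem.List.sorted newKeys (fun x => x) false).filter
          Q).map (pvFmtLine d) := by
        congr 1
        apply List.filter_congr
        intro nt hnt
        have hc : d.contains nt = true := by
          rcases List.mem_append.mp hnt with h | h
          · exact (List.mem_filter.mp h).2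
          · rw [PySem.Dict.contains_iff_mem_keys]
            have : nt ∈ newKeys := (PySem.List.mem_sorted newKeys (fun x => x) false nt).mp h
            exact (List.mem_filter.mp this).1
        rw [hc, Bool.true_and]
    _ = _ := by
        rw [← hBproj, List.filter_map, List.map_map]
        rfl

-- ===== VERDICT (by name: the statement is the Claim_ definition above) =====
theorem formatear_gramatica_spec : Claim_equal_formatear_gramatica := by
  intro producciones orden_original_nts _hdom hpre
  unfold Spec_formatear_gramatica
  unfold Pre_formatear_gramatica at hpre
  exact formatear_gramatica_eq_alt producciones orden_original_nts hpre
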